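-- pv_equiv track=rewrite | github.com/HarrisWarner04/BinaryBattle2026BugBiceps | backend/services/github_service.py | _pick_key_files
-- ===== SOURCE A (Python) =====
-- _KEY_FILE_PATTERNS = [
--     # Entry points
--     "main.py", "app.py", "server.py", "index.js", "index.ts", "app.js", "app.ts",
--     "server.js", "server.ts", "main.go", "main.rs", "Main.java", "Program.cs",
--     # Core logic
--     "routes.py", "views.py", "models.py", "schema.py", "api.py",
--     "routes.js", "routes.ts", "controllers.js", "controllers.ts",
--     # Config
--     "Dockerfile", "docker-compose.yml", "requirements.txt", "package.json",
-- ]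
--
-- def _pick_key_files(file_list: list[str], max_files: int = 3) -> list[str]:
--     """Pick the most important source files from the file tree."""
--     picked = []
--     # First pass: exact matches
--     for pattern in _KEY_FILE_PATTERNS:
--         for f in file_list:
--             basename = f.rsplit("/", 1)[-1] if "/" in f else f
--             if basename == pattern and f not in picked:
--                 picked.append(f)
--                 if len(picked) >= max_files:
--                     return picked
--     # Second pass: any .py, .js, .ts, .java, .go source files
--     source_exts = (".py", ".js", ".ts", ".java", ".go", ".rs", ".cpp", ".c")
--     for f in file_list:
--         if any(f.endswith(ext) for ext in source_exts) and f not in picked: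
--             # Skip test/config files
--             basename = f.rsplit("/", 1)[-1] if "/" in f else f
--             if not basename.startswith("test_") and basename not in ("setup.py", "conftest.py"):
--                 picked.append(f)
--                 if len(picked) >= max_files:
--                     return picked
--     return picked
-- ===== SOURCE B (Python) =====
-- _KEY_FILE_PATTERNS = [
--     # Entry points
--     "main.py", "app.py", "server.py", "index.js", "index.ts", "app.js", "app.ts",
--     "server.js", "server.ts", "main.go", "main.rs", "Main.java", "Program.cs",
--     # Core logic
--     "routes.py", "views.py", "models.py", "schema.py", "api.py",
--     "routes.js", "routes.ts", "controllers.js", "controllers.ts",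
--     # Config
--     "Dockerfile", "docker-compose.yml", "requirements.txt", "package.json",
-- ]
--
--
-- def _pick_key_files(file_list: list[str], max_files: int = 3) -> list[str]:
--     """Pick the most important source files from the file tree."""
--     # Index the files by basename once, preserving file_list order per name.
--     by_name = {}
--     for f in file_list:
--         base = f.rsplit("/", 1)[-1] if "/" in f else f
--         by_name.setdefault(base, []).append(f)
--     # Ordered candidate stream: pattern matches (in priority order), then
--     # non-test source files in file_list order.
--     candidates = []
--     for pattern in _KEY_FILE_PATTERNS:
--         candidates.extend(by_name.get(pattern, []))
--     source_exts = (".py", ".js", ".ts", ".java", ".go", ".rs", ".cpp", ".c")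
--     for f in file_list:
--         if any(f.endswith(ext) for ext in source_exts):
--             base = f.rsplit("/", 1)[-1] if "/" in f else f
--             if not base.startswith("test_") and base not in ("setup.py", "conftest.py"):
--                 candidates.append(f)
--     # One selection loop with cross-stream dedup and early stop.
--     picked = []
--     for f in candidates:
--         if f not in picked:
--             picked.append(f)
--             if len(picked) >= max_files:
--                 return picked
--     return picked
-- ===== Notes on version B (the rewrite author's own statement) =====
-- stated objective: faster
-- what changed: Instead of A's 26 pattern-by-pattern rescans of file_list followed by a separate fallback scan, B builds a basename-to-files index in one pass, concatenates an ordered candidate stream (pattern matches in priority order, then filtered source files), and runs a single dedup/early-stop selection loop over it.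
import Mathlib
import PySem

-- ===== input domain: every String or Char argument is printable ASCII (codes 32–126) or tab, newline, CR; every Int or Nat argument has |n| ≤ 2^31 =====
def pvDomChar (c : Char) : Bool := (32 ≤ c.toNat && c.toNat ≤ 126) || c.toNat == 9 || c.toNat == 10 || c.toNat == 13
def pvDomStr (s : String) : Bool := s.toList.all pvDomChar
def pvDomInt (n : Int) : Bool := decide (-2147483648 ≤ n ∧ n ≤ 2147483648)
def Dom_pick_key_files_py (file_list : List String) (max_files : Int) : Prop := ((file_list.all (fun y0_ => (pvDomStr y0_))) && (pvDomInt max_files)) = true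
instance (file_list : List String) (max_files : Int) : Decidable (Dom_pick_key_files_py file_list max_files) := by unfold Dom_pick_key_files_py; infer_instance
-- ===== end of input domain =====

-- B replaces A's pattern-by-pattern rescans of file_list with a basename index built once
-- plus one unified selection loop over an ordered candidate stream (objective: alternative).

-- shared helpers (both Pythons compute the same basename and test the same conditions)
def keyFilePatterns : List String :=
  ["main.py", "app.py", "server.py", "index.js", "index.ts", "app.js", "app.ts",
   "server.js", "server.ts", "main.go", "main.rs", "Main.java", "Program.cs",
   "routes.py", "views.py", "models.py", "schema.py", "api.py",
   "routes.js", "routes.ts", "controllers.js", "controllers.ts",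
   "Dockerfile", "docker-compose.yml", "requirements.txt", "package.json"]

def sourceExts : List String := [".py", ".js", ".ts", ".java", ".go", ".rs", ".cpp", ".c"]

-- f.rsplit("/", 1)[-1] if "/" in f else f  — hand port, exact: rsplit("/",1)[-1] is the
-- maximal '/'-free suffix of f (and equals f itself when '/' does not occur in f).
def pyBasename (f : String) : String :=
  if PySem.Str.isIn "/" f then String.ofList ((f.toList.reverse.takeWhile (fun c => c ≠ '/')).reverse)
  else f

-- any(f.endswith(ext) for ext in source_exts)
def srcCond (f : String) : Bool := sourceExts.any (fun e => PySem.Str.endswith f e)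

-- not basename.startswith("test_") and basename not in ("setup.py", "conftest.py")
def nameCond (b : String) : Bool :=
  !(PySem.Str.startswith b "test_") && !(b == "setup.py") && !(b == "conftest.py")

-- ===== PORT A =====
-- first pass, inner loop over file_list for one pattern; Bool = "returned early"
def aInner (pattern : String) : List String → Int → List String → List String × Bool
  | [], _, picked => (picked, false)
  | f :: rest, m, picked =>
    if pyBasename f == pattern && !(picked.contains f) then
      let picked' := picked ++ [f]
      if m ≤ (picked'.length : Int) then (picked', true)
      else aInner pattern rest m picked'
    else aInner pattern rest m picked

-- first pass, outer loop over the patterns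
def aOuter : List String → List String → Int → List String → List String × Bool
  | [], _, _, picked => (picked, false)
  | p :: ps, fl, m, picked =>
    match aInner p fl m picked with
    | (picked', true) => (picked', true)
    | (picked', false) => aOuter ps fl m picked'

-- second pass over file_list
def aPass2 : List String → Int → List String → List String
  | [], _, picked => picked
  | f :: rest, m, picked =>
    if srcCond f && !(picked.contains f) then
      if nameCond (pyBasename f) then
        let picked' := picked ++ [f]
        if m ≤ (picked'.length : Int) then picked'
        else aPass2 rest m picked'
      else aPass2 rest m picked
    else aPass2 rest m picked

def pick_key_files_py (file_list : List String) (max_files : Int) : List String :=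
  match aOuter keyFilePatterns file_list max_files [] with
  | (picked, true) => picked
  | (picked, false) => aPass2 file_list max_files picked

-- ===== PORT B =====
-- the single selection loop over the candidate stream
def bSelect : List String → Int → List String → List String
  | [], _, picked => picked
  | f :: rest, m, picked =>
    if !(picked.contains f) then
      let picked' := picked ++ [f]
      if m ≤ (picked'.length : Int) then picked'
      else bSelect rest m picked'
    else bSelect rest m picked

def pick_key_files_py_alt (file_list : List String) (max_files : Int) : List String :=
  -- by_name: basename → files with that basename, in file_list order
  let byName : PySem.Dict String (List String) :=
    file_list.foldl (fun d f => d.modify (pyBasename f) [] (· ++ [f])) PySem.Dict.empty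
  let cand1 : List String :=
    keyFilePatterns.foldl (fun acc p => acc ++ byName.getD p []) []
  let cand2 : List String :=
    file_list.foldl (fun acc f =>
      if srcCond f then
        if nameCond (pyBasename f) then acc ++ [f] else acc
      else acc) []
  bSelect (cand1 ++ cand2) max_files []

-- ===== PRECONDITION & SPEC =====
def Spec_pick_key_files_py (file_list : List String) (max_files : Int) (out : List String) : Prop := out = pick_key_files_py_alt file_list max_files
instance (file_list : List String) (max_files : Int) (out : List String) : Decidable (Spec_pick_key_files_py file_list max_files out) := by unfold Spec_pick_key_files_py; infer_instance

-- ===== CLAIM (what is proved, stated in full; the proofs are below) =====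
def Claim_equal_pick_key_files_py : Prop := ∀ (file_list : List String) (max_files : Int), Dom_pick_key_files_py file_list max_files → Spec_pick_key_files_py file_list max_files (pick_key_files_py file_list max_files)

-- ===== LEMMAS AND PROOFS =====

-- selection loop with an explicit "returned early" flag (proof device)
def sel : List String → Int → List String → List String × Bool
  | [], _, picked => (picked, false)
  | f :: rest, m, picked =>
    if !(picked.contains f) then
      let picked' := picked ++ [f]
      if m ≤ (picked'.length : Int) then (picked', true)
      else sel rest m picked'
    else sel rest m picked

lemma bSelect_eq_sel (xs : List String) (m : Int) (p : List String) :
    bSelect xs m p = (sel xs m p).1 := by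
  induction xs generalizing p with
  | nil => rfl
  | cons f rest ih =>
    simp only [bSelect, sel]
    split_ifs <;> simp [ih]

lemma sel_append (xs ys : List String) (m : Int) (p : List String) :
    sel (xs ++ ys) m p =
      match sel xs m p with
      | (q, true) => (q, true)
      | (q, false) => sel ys m q := by
  induction xs generalizing p with
  | nil => rfl
  | cons f rest ih =>
    simp only [List.cons_append, sel]
    split_ifs <;> simp [ih]

-- A's inner pattern scan is the selection loop over the matching files
lemma aInner_eq_sel (pat : String) (fl : List String) (m : Int) (p : List String) :
    aInner pat fl m p = sel (fl.filter (fun f => pyBasename f == pat)) m p := by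
  induction fl generalizing p with
  | nil => rfl
  | cons f rest ih =>
    cases hb : (pyBasename f == pat) with
    | false => simp [aInner, hb, ih]
    | true =>
      by_cases hm : f ∈ p
      · simp [aInner, sel, hb, hm, ih]
      · simp [aInner, sel, hb, hm, ih]

-- A's first pass is the selection loop over the concatenated pattern matches
lemma aOuter_eq_sel (ps fl : List String) (m : Int) (p : List String) :
    aOuter ps fl m p = sel (ps.flatMap (fun pat => fl.filter (fun f => pyBasename f == pat))) m p := by
  induction ps generalizing p with
  | nil => rfl
  | cons pat ps ih =>
    simp only [aOuter, List.flatMap_cons, sel_append, aInner_eq_sel]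
    rcases h : sel (fl.filter (fun f => pyBasename f == pat)) m p with ⟨q, b⟩
    cases b <;> simp [ih]

-- A's second pass is the selection loop over the filtered source files
lemma aPass2_eq_sel (fl : List String) (m : Int) (p : List String) :
    aPass2 fl m p = (sel (fl.filter (fun f => srcCond f && nameCond (pyBasename f))) m p).1 := by
  induction fl generalizing p with
  | nil => rfl
  | cons f rest ih =>
    cases hs : srcCond f with
    | false => simp [aPass2, hs, ih]
    | true =>
      cases hn : nameCond (pyBasename f) with
      | false => simp [aPass2, hs, hn, ih]
      | true =>
        by_cases hm : f ∈ p
        · simp [aPass2, sel, hs, hn, hm, ih]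
        · by_cases hl : m ≤ (p.length : Int) + 1 <;>
            simp [aPass2, sel, hs, hn, hm, hl, ih]

-- B's basename index looked up at a pattern is exactly the matching files, in order
lemma byName_getD (fl : List String) (pat : String) :
    ((fl.foldl (fun d f => d.modify (pyBasename f) [] (· ++ [f])) PySem.Dict.empty).getD pat [])
      = fl.filter (fun f => pyBasename f == pat) := by
  have h : fl.foldl (fun d f => d.modify (pyBasename f) [] (· ++ [f])) PySem.Dict.empty
      = (fl.map (fun f => (pyBasename f, f))).foldl
          (fun d p => d.modify p.1 [] (· ++ [p.2])) PySem.Dict.empty := by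
    rw [List.foldl_map]
  rw [h, PySem.Dict.getD_foldl_modify_append]
  simp only [PySem.Dict.getD_empty, List.nil_append]
  clear h
  induction fl with
  | nil => rfl
  | cons f rest ih =>
    cases hb : (pyBasename f == pat) with
    | true => simp [hb, ih]
    | false => simp [hb, ih]

-- B's pattern candidates are the concatenated pattern matches
lemma cand1_eq (fl : List String) :
    keyFilePatterns.foldl (fun acc p =>
        acc ++ ((fl.foldl (fun d f => d.modify (pyBasename f) [] (· ++ [f])) PySem.Dict.empty).getD p [])) []
      = keyFilePatterns.flatMap (fun pat => fl.filter (fun f => pyBasename f == pat)) := by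
  simp only [byName_getD]
  rw [PySem.List.foldl_append_eq_flatMap]
  simp

-- B's source candidates are the filtered source files
lemma cand2_eq (fl : List String) :
    fl.foldl (fun acc f =>
      if srcCond f then
        if nameCond (pyBasename f) then acc ++ [f] else acc
      else acc) []
      = fl.filter (fun f => srcCond f && nameCond (pyBasename f)) := by
  have gen : ∀ (l acc : List String),
      l.foldl (fun acc f =>
        if srcCond f then
          if nameCond (pyBasename f) then acc ++ [f] else acc
        else acc) acc
      = acc ++ l.filter (fun f => srcCond f && nameCond (pyBasename f)) := by
    intro l
    induction l with
    | nil => simp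
    | cons f rest ih =>
      intro acc
      cases hs : srcCond f with
      | false => simp [hs, ih]
      | true =>
        cases hn : nameCond (pyBasename f) with
        | false => simp [hs, hn, ih]
        | true => simp [hs, hn, ih]
  simpa using gen fl []

-- ===== VERDICT (by name: the statement is the Claim_ definition above) =====
theorem pick_key_files_py_spec : Claim_equal_pick_key_files_py := by
  intro fl m _
  unfold Spec_pick_key_files_py pick_key_files_py pick_key_files_py_alt
  simp only [cand1_eq, cand2_eq, bSelect_eq_sel, sel_append, aOuter_eq_sel, aPass2_eq_sel]
  rcases h : sel (keyFilePatterns.flatMap (fun pat => fl.filter (fun f => pyBasename f == pat))) m [] with ⟨q, b⟩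
  cases b <;> simp
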